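-- pv_equiv track=rewrite | github.com/BU-PS/PS | programmers/level2/mee/2.기능개발.py | solution
-- ===== SOURCE A (Python) =====
-- def solution(progresses,speeds):
--     answer=[]
--
--     while progresses:
--         count=0
--         progresses=[i+j for i,j in zip(progresses,speeds)]
--
--         while progresses and progresses[0]>=100:
--             progresses.pop(0)
--             speeds.pop(0)
--             count+=1
--
--         if count:
--             answer.append(count)
--
--     return answer
-- ===== SOURCE B (Python) =====
-- def solution(progresses, speeds):
--     # completion day of each task via ceiling division, then one pass grouping
--     # consecutive tasks whose day does not exceed the current group leader's day
--     days = [max(1, (100 - p + s - 1) // s) for p, s in zip(progresses, speeds)]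
--     answer = []
--     i, n = 0, len(days)
--     while i < n:
--         j = i + 1
--         while j < n and days[j] <= days[i]:
--             j += 1
--         answer.append(j - i)
--         i = j
--     return answer
-- ===== Notes on version B (the rewrite author's own statement) =====
-- stated objective: faster
-- what changed: B replaces A's day-by-day simulation (re-mapping and popping the whole remaining list every day) by computing each task's completion day once with a ceiling division and grouping consecutive tasks whose day does not exceed the group leader's in a single scan.
-- outside the precondition, e.g. on solution([200], [0]): A returns [1], B raises ZeroDivisionError; on solution([-5], [1]): A returns [1], B returns [1]
import Mathlib
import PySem

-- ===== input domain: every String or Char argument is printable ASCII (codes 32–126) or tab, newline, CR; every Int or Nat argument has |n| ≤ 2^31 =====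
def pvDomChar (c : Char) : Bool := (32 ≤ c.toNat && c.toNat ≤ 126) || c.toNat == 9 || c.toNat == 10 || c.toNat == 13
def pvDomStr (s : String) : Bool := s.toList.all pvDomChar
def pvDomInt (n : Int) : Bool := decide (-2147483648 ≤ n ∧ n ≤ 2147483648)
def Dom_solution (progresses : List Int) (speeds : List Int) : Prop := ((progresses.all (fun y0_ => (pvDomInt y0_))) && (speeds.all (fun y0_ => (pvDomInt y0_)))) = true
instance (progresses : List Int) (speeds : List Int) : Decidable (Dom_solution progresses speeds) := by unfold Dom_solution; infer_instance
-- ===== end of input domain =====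

-- B replaces A's day-by-day simulation by a closed-form completion day per task
-- (ceiling division) and one grouping scan; equivalence is about the RETURN value
-- only (Python A pops elements off the caller's `speeds` list in place).

-- ===== PORT A =====
-- inner `while progresses and progresses[0]>=100: pop both; count+=1`
-- (the branch where speeds runs out first is unreachable from `solution`:
--  after the zip-rebuild, progresses is never longer than speeds)
def popLoop : List Int → List Int → Int × List Int × List Int
  | p :: ps, s :: ss =>
    if 100 ≤ p then
      let r := popLoop ps ss
      (r.1 + 1, r.2.1, r.2.2)
    else (0, p :: ps, s :: ss)
  | ps, ss => (0, ps, ss)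

-- outer `while progresses:` — fuel-bounded; under Pre_ (0 ≤ progress, 1 ≤ speed)
-- every task completes within 100 days, so 101 iterations always suffice
def solutionLoop : Nat → List Int → List Int → List Int → List Int
  | 0, _, _, acc => acc
  | f + 1, ps, ss, acc =>
    if ps = [] then acc
    else
      let ps1 := (ps.zip ss).map (fun pr => pr.1 + pr.2)
      let r := popLoop ps1 ss
      solutionLoop f r.2.1 r.2.2 (if r.1 ≠ 0 then acc ++ [r.1] else acc)

def solution (progresses : List Int) (speeds : List Int) : List Int :=
  solutionLoop 101 progresses speeds []

-- ===== PORT B =====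
-- days = [max(1, (100 - p + s - 1) // s) for p, s in zip(progresses, speeds)]
def daysOf (progresses : List Int) (speeds : List Int) : List Int :=
  (progresses.zip speeds).map (fun pr => max 1 (PySem.Int.floordiv (100 - pr.1 + pr.2 - 1) pr.2))

-- the two-pointer scan of Source B: the inner `while j < n and days[j] <= days[i]`
-- is the takeWhile over the tail, `answer.append(j - i); i = j` the cons/drop
def groupDays : List Int → List Int
  | [] => []
  | d :: ds =>
    (1 + ((ds.takeWhile (fun e => decide (e ≤ d))).length : Int)) ::
      groupDays (ds.dropWhile (fun e => decide (e ≤ d)))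
termination_by l => l.length
decreasing_by
  simp only [List.length_cons]
  exact Nat.lt_succ_of_le (List.length_dropWhile_le _ _)

def solution_alt (progresses : List Int) (speeds : List Int) : List Int :=
  groupDays (daysOf progresses speeds)

-- ===== PRECONDITION & SPEC =====
-- Pre_ is the natural domain of the problem: each used progress is a percentage
-- (0 ≤ p) and each used speed is positive.  With a non-positive speed A loops
-- forever on any task that is not already completable; with a negative progress
-- A still returns (and B agrees where both return) but A needs ~|p| iterations,
-- so such inputs are outside the stated natural domain.
def Pre_solution (progresses : List Int) (speeds : List Int) : Prop :=
  ∀ pr ∈ progresses.zip speeds, 0 ≤ pr.1 ∧ 1 ≤ pr.2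
instance (progresses : List Int) (speeds : List Int) : Decidable (Pre_solution progresses speeds) := by
  unfold Pre_solution; infer_instance

def pvWitness_solution : List Int × List Int := ([93, 30, 55], [1, 30, 5])

def Spec_solution (progresses : List Int) (speeds : List Int) (out : List Int) : Prop := out = solution_alt progresses speeds
instance (progresses : List Int) (speeds : List Int) (out : List Int) : Decidable (Spec_solution progresses speeds out) := by unfold Spec_solution; infer_instance

-- ===== CLAIM (what is proved, stated in full; the proofs are below) =====
def Claim_equal_solution : Prop := ∀ (progresses : List Int) (speeds : List Int), Dom_solution progresses speeds → Pre_solution progresses speeds → Spec_solution progresses speeds (solution progresses speeds)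

-- ===== LEMMAS AND PROOFS =====

-- completion "error margin": number of further days until the task pops
def eDays (pr : Int × Int) : Int := PySem.Int.floordiv (100 - pr.1 + pr.2 - 1) pr.2

-- A's simulation, abstracted to the per-task day counters: each day every
-- counter drops by 1 and the prefix of counters ≤ 0 is released
def simI : Nat → List Int → List Int → List Int
  | 0, _, acc => acc
  | f + 1, E, acc =>
    if E = [] then acc
    else
      let E' := E.map (· - 1)
      let k := (E'.takeWhile (fun e => decide (e ≤ 0))).length
      simI f (E'.dropWhile (fun e => decide (e ≤ 0))) (if (k : Int) ≠ 0 then acc ++ [(k : Int)] else acc)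

theorem takeWhile_congr_mem {α : Type} (p q : α → Bool) :
    ∀ (l : List α), (∀ a ∈ l, p a = q a) → l.takeWhile p = l.takeWhile q := by
  intro l h
  induction l with
  | nil => rfl
  | cons a l ih =>
    simp only [List.takeWhile_cons, h a (by simp)]
    cases q a with
    | true => simp [ih (fun b hb => h b (by simp [hb]))]
    | false => rfl

theorem dropWhile_congr_mem {α : Type} (p q : α → Bool) :
    ∀ (l : List α), (∀ a ∈ l, p a = q a) → l.dropWhile p = l.dropWhile q := by
  intro l h
  induction l with
  | nil => rfl
  | cons a l ih =>
    simp only [List.dropWhile_cons, h a (by simp)]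
    cases q a with
    | true => simp [ih (fun b hb => h b (by simp [hb]))]
    | false => rfl

theorem eDays_sub (p s : Int) (hs : 1 ≤ s) : eDays (p + s, s) = eDays (p, s) - 1 := by
  unfold eDays
  dsimp only
  have h0 : (0:Int) < s := by omega
  rw [PySem.Int.floordiv_eq_ediv_of_pos h0, PySem.Int.floordiv_eq_ediv_of_pos h0]
  have h1 : 100 - p + s - 1 = (100 - (p + s) + s - 1) + 1 * s := by ring
  rw [h1, Int.add_mul_ediv_right _ _ (by omega : s ≠ 0)]
  ring

theorem eDays_nonpos_iff (p s : Int) (hs : 1 ≤ s) : eDays (p, s) ≤ 0 ↔ 100 ≤ p := by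
  unfold eDays
  dsimp only
  have h0 : (0:Int) < s := by omega
  have h1 := PySem.Int.floordiv_lt_iff_lt_mul (a := 100 - p + s - 1) (b := s) (q := 1) h0
  constructor
  · intro h; have := h1.mp (by omega); omega
  · intro h; have := h1.mpr (by omega); omega

theorem eDays_lt (p s : Int) (hp : 0 ≤ p) (hs : 1 ≤ s) : eDays (p, s) < 101 := by
  unfold eDays
  dsimp only
  have h0 : (0:Int) < s := by omega
  have h1 := PySem.Int.floordiv_lt_iff_lt_mul (a := 100 - p + s - 1) (b := s) (q := 101) h0
  exact h1.mpr (by omega)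

theorem zip_map_fst_snd (L : List (Int × Int)) (ext : List Int) :
    (L.map Prod.fst).zip (L.map Prod.snd ++ ext) = L := by
  induction L with
  | nil => rfl
  | cons a L ih => simp [ih]

theorem snd_decomp (ps ss : List Int) :
    (ps.zip ss).map Prod.snd ++ ss.drop ps.length = ss := by
  induction ps generalizing ss with
  | nil => simp
  | cons p ps ih => cases ss with
    | nil => rfl
    | cons s ss => simp [ih]

theorem popLoop_eq (L : List (Int × Int)) (ext : List Int) :
    popLoop (L.map Prod.fst) (L.map Prod.snd ++ ext) =
      (((L.takeWhile (fun pr => decide (100 ≤ pr.1))).length : Int),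
       (L.dropWhile (fun pr => decide (100 ≤ pr.1))).map Prod.fst,
       (L.dropWhile (fun pr => decide (100 ≤ pr.1))).map Prod.snd ++ ext) := by
  induction L with
  | nil => simp [popLoop]
  | cons a L ih =>
    by_cases h : 100 ≤ a.1
    · simp [popLoop, h, ih]
    · simp [popLoop, h]

theorem head?_dropWhile_false {α : Type} (p : α → Bool) :
    ∀ (l : List α) (h : α), (l.dropWhile p).head? = some h → p h = false := by
  intro l
  induction l with
  | nil => intro h hh; simp [List.dropWhile] at hh
  | cons a l ih =>
    intro h hh
    rw [List.dropWhile_cons] at hh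
    by_cases hpa : p a = true
    · rw [if_pos hpa] at hh; exact ih h hh
    · rw [if_neg hpa] at hh
      simp only [List.head?_cons, Option.some.injEq] at hh
      subst hh
      exact Bool.eq_false_iff.mpr hpa

theorem simI_nil (f : Nat) (acc : List Int) : simI f [] acc = acc := by
  cases f <;> simp [simI]

theorem loop_eq : ∀ (f : Nat) (ps ss acc : List Int),
    (∀ pr ∈ ps.zip ss, 1 ≤ pr.2) →
    solutionLoop f ps ss acc = simI f ((ps.zip ss).map eDays) acc := by
  intro f
  induction f with
  | zero => intro ps ss acc _; rfl
  | succ f ih =>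
    intro ps ss acc hv
    by_cases hps : ps = []
    · subst hps; simp [solutionLoop, simI]
    · by_cases hLnil : ps.zip ss = []
      · simp only [solutionLoop, if_neg hps, hLnil, List.map_nil, popLoop]
        simp only [ne_eq, not_true_eq_false, if_false, reduceIte]
        rw [ih [] ss acc (by simp)]
        simp [simI_nil, simI]
      · -- main case: the zipped state is nonempty
        have hv' : ∀ pr ∈ ps.zip ss, 1 ≤ pr.2 := hv
        have hv1 : ∀ pr ∈ (ps.zip ss).map (fun pr => (pr.1 + pr.2, pr.2)), 1 ≤ pr.2 := by
          intro pr hpr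
          rw [List.mem_map] at hpr
          obtain ⟨a, ha, rfl⟩ := hpr
          exact hv' a ha
        have hss : ss = ((ps.zip ss).map (fun pr => (pr.1 + pr.2, pr.2))).map Prod.snd
            ++ ss.drop ps.length := by
          rw [List.map_map]
          exact (snd_decomp ps ss).symm
        have hps1 : (ps.zip ss).map (fun pr => pr.1 + pr.2)
            = ((ps.zip ss).map (fun pr => (pr.1 + pr.2, pr.2))).map Prod.fst := by
          rw [List.map_map]; rfl
        have hpop := popLoop_eq ((ps.zip ss).map (fun pr => (pr.1 + pr.2, pr.2))) (ss.drop ps.length)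
        -- LHS one step
        rw [show solutionLoop (f + 1) ps ss acc
            = (let ps1 := (ps.zip ss).map (fun pr => pr.1 + pr.2);
               let r := popLoop ps1 ss;
               solutionLoop f r.2.1 r.2.2 (if r.1 ≠ 0 then acc ++ [r.1] else acc))
            from by rw [solutionLoop, if_neg hps]]
        simp only []
        rw [hps1]
        rw [← hss] at hpop
        rw [hpop]
        -- recursive call via ih on the aligned remaining state
        have hzipR := zip_map_fst_snd
          ((((ps.zip ss).map (fun pr => (pr.1 + pr.2, pr.2))).dropWhile
              (fun pr => decide (100 ≤ pr.1)))) (ss.drop ps.length)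
        rw [ih _ _ _ (by
          rw [hzipR]
          intro pr hpr
          exact hv1 pr ((List.dropWhile_sublist _).subset hpr))]
        rw [hzipR]
        -- RHS one step
        have hmapne : (ps.zip ss).map eDays ≠ [] := by
          simp [List.map_eq_nil_iff, hLnil]
        rw [show simI (f + 1) ((ps.zip ss).map eDays) acc
            = (let E' := ((ps.zip ss).map eDays).map (· - 1);
               let k := (E'.takeWhile (fun e => decide (e ≤ 0))).length;
               simI f (E'.dropWhile (fun e => decide (e ≤ 0)))
                 (if (k : Int) ≠ 0 then acc ++ [(k : Int)] else acc))
            from by rw [simI, if_neg hmapne]]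
        simp only []
        have hE' : ((ps.zip ss).map eDays).map (fun e => e - 1)
            = ((ps.zip ss).map (fun pr => (pr.1 + pr.2, pr.2))).map eDays := by
          rw [List.map_map, List.map_map]
          apply List.map_congr_left
          intro pr hpr
          obtain ⟨p, s⟩ := pr
          exact ((eDays_sub p s (hv' (p, s) hpr)).symm : _)
        have hpredL : ∀ pr ∈ (ps.zip ss).map (fun pr => (pr.1 + pr.2, pr.2)),
            ((fun e => decide (e ≤ 0)) ∘ eDays) pr = (fun pr => decide (100 ≤ pr.1)) pr := by
          intro pr hpr
          obtain ⟨p, s⟩ := pr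
          simp only [Function.comp_apply, decide_eq_decide]
          exact eDays_nonpos_iff p s (hv1 (p, s) hpr)
        have hTW : ((((ps.zip ss).map (fun pr => (pr.1 + pr.2, pr.2))).map eDays).takeWhile
              (fun e => decide (e ≤ 0)))
            = (((ps.zip ss).map (fun pr => (pr.1 + pr.2, pr.2))).takeWhile
                (fun pr => decide (100 ≤ pr.1))).map eDays := by
          rw [List.takeWhile_map, takeWhile_congr_mem _ _ _ hpredL]
        have hDW : ((((ps.zip ss).map (fun pr => (pr.1 + pr.2, pr.2))).map eDays).dropWhile
              (fun e => decide (e ≤ 0)))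
            = (((ps.zip ss).map (fun pr => (pr.1 + pr.2, pr.2))).dropWhile
                (fun pr => decide (100 ≤ pr.1))).map eDays := by
          rw [List.dropWhile_map, dropWhile_congr_mem _ _ _ hpredL]
        rw [hE', hTW, hDW, List.length_map]
  theorem gstep : ∀ (n : Nat) (E : List Int), E.length ≤ n →
    (∀ h, E.head? = some h → 2 ≤ h) →
    groupDays (E.map (fun e => max 1 (e - 1))) = groupDays (E.map (fun e => max 1 e)) := by
  intro n
  induction n with
  | zero =>
    intro E hlen _
    cases E with
    | nil => rfl
    | cons a l => simp at hlen
  | succ n ih =>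
    intro E hlen hhead
    cases E with
    | nil => rfl
    | cons e0 es =>
      have he0 : (2:Int) ≤ e0 := hhead e0 rfl
      simp only [List.map_cons, groupDays]
      rw [List.takeWhile_map, List.takeWhile_map, List.dropWhile_map, List.dropWhile_map]
      have hfun : ((fun b => decide (b ≤ max 1 (e0 - 1))) ∘ (fun e : Int => max 1 (e - 1)))
          = ((fun b => decide (b ≤ max 1 e0)) ∘ (fun e : Int => max 1 e)) := by
        funext e
        simp only [Function.comp_apply, decide_eq_decide]
        omega
      rw [hfun]
      refine congrArg₂ List.cons ?_ ?_
      · simp [List.length_map]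
      · refine ih _ (le_trans (List.length_dropWhile_le _ _) (by simpa using Nat.lt_succ_iff.mp (Nat.lt_of_lt_of_le (Nat.lt_succ_self _) hlen))) ?_
        intro h hh
        have hf := head?_dropWhile_false _ es h hh
        simp only [Function.comp_apply, decide_eq_false_iff_not] at hf
        omega

theorem simg : ∀ (f : Nat) (E acc : List Int),
    (E = [] ∨ (0 < f ∧ ∀ e ∈ E, e < (f : Int))) →
    simI f E acc = acc ++ groupDays (E.map (fun e => max 1 e)) := by
  intro f
  induction f with
  | zero =>
    intro E acc h
    rcases h with h | h
    · subst h; simp [simI, groupDays]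
    · exact absurd h.1 (lt_irrefl 0)
  | succ f ih =>
    intro E acc h
    cases E with
    | nil => simp [simI, groupDays]
    | cons e0 es =>
      have hb : ∀ e ∈ (e0 :: es), e < (f:Int) + 1 := by
        rcases h with h | h
        · simp at h
        · intro e he
          have := h.2 e he
          push_cast at this
          omega
      have he0 : e0 < (f:Int) + 1 := hb e0 (by simp)
      rw [show simI (f + 1) (e0 :: es) acc
          = (let E' := (e0 :: es).map (· - 1);
             let k := (E'.takeWhile (fun e => decide (e ≤ 0))).length;
             simI f (E'.dropWhile (fun e => decide (e ≤ 0)))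
               (if (k : Int) ≠ 0 then acc ++ [(k : Int)] else acc))
          from by rw [simI, if_neg (by simp)]]
      simp only [List.map_cons]
      by_cases hc : e0 ≤ 1
      · -- the head task is released on day 1
        simp [List.takeWhile_cons, List.dropWhile_cons, hc]
        rw [List.takeWhile_map, List.dropWhile_map]
        have hp1 : ((fun e : Int => decide (e ≤ 0)) ∘ (fun e : Int => e - 1))
            = (fun e : Int => decide (e ≤ 1)) := by
          funext e
          simp only [Function.comp_apply, decide_eq_decide]
          omega
        rw [hp1]
        have hcond : ((es.dropWhile (fun e => decide (e ≤ 1))).map (· - 1) = [])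
            ∨ (0 < f ∧ ∀ e ∈ (es.dropWhile (fun e => decide (e ≤ 1))).map (· - 1), e < (f:Int)) := by
          by_cases hR : es.dropWhile (fun e => decide (e ≤ 1)) = []
          · left; simp [hR]
          · right
            cases hhd : (es.dropWhile (fun e => decide (e ≤ 1))).head? with
            | none => exact absurd (List.head?_eq_none_iff.mp hhd) hR
            | some hH =>
              have h2 : (2:Int) ≤ hH := by
                have hf := head?_dropWhile_false _ es hH hhd
                simp only [decide_eq_false_iff_not] at hf
                omega
              have hmemH : hH ∈ es :=
                (List.dropWhile_sublist _).subset (List.mem_of_mem_head? hhd)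
              have hHlt := hb hH (List.mem_cons_of_mem _ hmemH)
              refine ⟨by omega, ?_⟩
              intro e he
              rw [List.mem_map] at he
              obtain ⟨a, ha, rfl⟩ := he
              have : a ∈ es := (List.dropWhile_sublist _).subset ha
              have := hb a (List.mem_cons_of_mem _ this)
              omega
        rw [ih _ _ hcond]
        rw [List.map_map]
        have hg : groupDays ((es.dropWhile (fun e => decide (e ≤ 1))).map ((fun e => max 1 e) ∘ (· - 1)))
            = groupDays ((es.dropWhile (fun e => decide (e ≤ 1))).map (fun e => max 1 e)) := by
          have := gstep (es.dropWhile (fun e => decide (e ≤ 1))).length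
            (es.dropWhile (fun e => decide (e ≤ 1))) le_rfl (by
              intro h3 hh3
              have hf := head?_dropWhile_false _ es h3 hh3
              simp only [decide_eq_false_iff_not] at hf
              omega)
          simpa using this
        rw [hg]
        -- now the B side
        rw [show groupDays (1 :: es.map (fun e => max 1 e))
            = (1 + (((es.map (fun e => max 1 e)).takeWhile (fun e => decide (e ≤ 1))).length : Int)) ::
                groupDays ((es.map (fun e => max 1 e)).dropWhile (fun e => decide (e ≤ 1)))
            from by rw [groupDays]]
        rw [List.takeWhile_map, List.dropWhile_map]
        have hp2 : ((fun e : Int => decide (e ≤ 1)) ∘ (fun e : Int => max 1 e))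
            = (fun e : Int => decide (e ≤ 1)) := by
          funext e
          simp only [Function.comp_apply, decide_eq_decide]
          omega
        rw [hp2]
        split_ifs with hif
        · exfalso; omega
        · rw [List.append_assoc, List.singleton_append]
          simp only [List.length_map]
          congr 2
          push_cast
          ring
      · -- no release this day: every counter just drops by one
        simp [List.takeWhile_cons, List.dropWhile_cons, hc]
        have hcond : ((e0 - 1) :: es.map (· - 1) = [])
            ∨ (0 < f ∧ ∀ e ∈ (e0 - 1) :: es.map (· - 1), e < (f:Int)) := by
          right
          refine ⟨by omega, ?_⟩
          intro e he
          rcases List.mem_cons.mp he with rfl | he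
          · omega
          · rw [List.mem_map] at he
            obtain ⟨a, ha, rfl⟩ := he
            have := hb a (List.mem_cons_of_mem _ ha)
            omega
        have := ih ((e0 - 1) :: es.map (· - 1)) acc hcond
        rw [this]
        congr 1
        have hEq : ((e0 - 1) :: es.map (· - 1)).map (fun e => max 1 e)
            = ((e0 :: es).map (fun e => max 1 (e - 1))) := by
          simp [List.map_map]
        rw [hEq]
        have := gstep (e0 :: es).length (e0 :: es) le_rfl (by
          intro h3 hh3
          simp only [List.head?_cons, Option.some.injEq] at hh3
          omega)
        simpa using this

-- ===== VERDICT (by name: the statement is the Claim_ definition above) =====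
theorem solution_spec : Claim_equal_solution := by
  unfold Claim_equal_solution Spec_solution
  intro ps ss _ hpre
  unfold solution solution_alt
  rw [loop_eq 101 ps ss [] (fun pr hpr => (hpre pr hpr).2)]
  rw [simg 101 _ [] (by
    by_cases hz : (ps.zip ss).map eDays = []
    · exact Or.inl hz
    · refine Or.inr ⟨by omega, ?_⟩
      intro e he
      rw [List.mem_map] at he
      obtain ⟨pr, hpr, rfl⟩ := he
      obtain ⟨p, s⟩ := pr
      have := hpre (p, s) hpr
      exact lt_of_lt_of_le (eDays_lt p s this.1 this.2) (by norm_num))]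
  rw [List.nil_append]
  unfold daysOf
  rw [List.map_map]
  rfl
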